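-- pv_equiv track=rewrite | github.com/jeanallen928/coding_test | 17681_secret_map.py | solution
-- ===== SOURCE A (Python) =====
-- def solution(n, arr1, arr2):
--     answer = []
--     arr1_bin = [bin(row)[2:].zfill(n) for row in arr1]
--     arr2_bin = [bin(row)[2:].zfill(n) for row in arr2]
--
--     for i in range(n):
--         arr1_int = list(map(int, str(arr1_bin[i])))
--         arr2_int = list(map(int, str(arr2_bin[i])))
--         add_str = ""
--         for j in range(n):
--             if arr1_int[j] + arr2_int[j] == 0:
--                 add_str += " "
--             else:
--                 add_str += "#"
--         answer.append(add_str)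
--
--     return answer
-- ===== SOURCE B (Python) =====
-- def solution(n, arr1, arr2):
--     answer = []
--     for i in range(n):
--         row = format(arr1[i] | arr2[i], 'b').zfill(n)
--         answer.append(''.join('#' if c == '1' else ' ' for c in row))
--     return answer
-- ===== Notes on version B (the rewrite author's own statement) =====
-- stated objective: simpler
-- what changed: Replaces the two precomputed digit-string lists and the per-bit digit-sum inner loop with a single bitwise OR per row formatted once to binary and mapped to '#'/' ' characters.
-- outside the precondition, e.g. on solution(2, [4, 0], [0, 0]): A returns ['# ', '  '], B returns ['#  ', '  ']
import Mathlib
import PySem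

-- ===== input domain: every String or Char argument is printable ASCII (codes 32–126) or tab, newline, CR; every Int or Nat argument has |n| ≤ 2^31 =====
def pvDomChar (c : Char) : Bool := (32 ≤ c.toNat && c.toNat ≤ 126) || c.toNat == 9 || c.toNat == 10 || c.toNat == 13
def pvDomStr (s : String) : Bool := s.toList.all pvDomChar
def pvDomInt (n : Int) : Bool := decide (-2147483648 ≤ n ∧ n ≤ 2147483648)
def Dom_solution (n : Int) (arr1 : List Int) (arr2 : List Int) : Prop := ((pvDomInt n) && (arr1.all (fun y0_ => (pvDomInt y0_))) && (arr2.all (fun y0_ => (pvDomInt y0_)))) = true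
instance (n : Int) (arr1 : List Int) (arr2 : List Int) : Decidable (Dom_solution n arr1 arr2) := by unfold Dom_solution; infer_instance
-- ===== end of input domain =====

-- B replaces A's two digit-string lists and per-bit digit-sum inner loop by one bitwise OR
-- per row, formatted once to binary and mapped to '#'/' ' (objective: simpler).

-- ===== PORT A =====
-- int(c) on a single char, as A applies it to each binary digit; exact on Pre_ inputs
-- (there every digit is '0'/'1'; PySem.Int.ofChars? is int(), none = ValueError).
def pvCharInt (c : Char) : Int := (PySem.Int.ofChars? [c]).getD 0

def solution (n : Int) (arr1 : List Int) (arr2 : List Int) : List String :=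
  let arr1_bin : List (List Char) :=
    arr1.map (fun row => PySem.Chars.zfill (PySem.List.slice (PySem.Int.toBinChars0b row) (some 2) none) n)
  let arr2_bin : List (List Char) :=
    arr2.map (fun row => PySem.Chars.zfill (PySem.List.slice (PySem.Int.toBinChars0b row) (some 2) none) n)
  (PySem.List.pyRange 0 n 1).foldl (fun answer i =>
    let arr1_int : List Int := (PySem.List.pyGetD arr1_bin i []).map pvCharInt
    let arr2_int : List Int := (PySem.List.pyGetD arr2_bin i []).map pvCharInt
    let add_str : List Char :=
      (PySem.List.pyRange 0 n 1).foldl (fun add_str j =>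
        if PySem.List.pyGetD arr1_int j 0 + PySem.List.pyGetD arr2_int j 0 = 0 then add_str ++ [' ']
        else add_str ++ ['#']) []
    answer ++ [String.ofList add_str]) []

-- ===== PORT B =====
def solution_alt (n : Int) (arr1 : List Int) (arr2 : List Int) : List String :=
  (PySem.List.pyRange 0 n 1).foldl (fun answer i =>
    let row : List Char :=
      PySem.Chars.zfill
        (PySem.Int.toBinChars (PySem.Int.bor (PySem.List.pyGetD arr1 i 0) (PySem.List.pyGetD arr2 i 0))) n
    answer ++ [String.ofList (row.map (fun c => if c = '1' then '#' else ' '))]) []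

-- ===== PRECONDITION & SPEC =====
-- Pre_ excludes inputs where A raises (n exceeding a list's length → IndexError; a negative
-- row among the first n → int('b') ValueError) and the defensible corner of rows ≥ 2^n, whose
-- binary strings are wider than n: there A keeps the top n bits and B keeps them all, an
-- unspecified corner of the n-bit-map task on which either choice is as good as the other.
def Pre_solution (n : Int) (arr1 : List Int) (arr2 : List Int) : Prop :=
  n ≤ (arr1.length : Int) ∧ n ≤ (arr2.length : Int) ∧
  ∀ k : Nat, k < n.toNat →
    0 ≤ arr1.getD k 0 ∧ arr1.getD k 0 < 2 ^ n.toNat ∧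
    0 ≤ arr2.getD k 0 ∧ arr2.getD k 0 < 2 ^ n.toNat

instance (n : Int) (arr1 : List Int) (arr2 : List Int) : Decidable (Pre_solution n arr1 arr2) := by
  unfold Pre_solution; infer_instance

def pvWitness_solution : Int × List Int × List Int := (2, [1, 2], [2, 1])

def Spec_solution (n : Int) (arr1 : List Int) (arr2 : List Int) (out : List String) : Prop := out = solution_alt n arr1 arr2
instance (n : Int) (arr1 : List Int) (arr2 : List Int) (out : List String) : Decidable (Spec_solution n arr1 arr2 out) := by unfold Spec_solution; infer_instance

-- ===== CLAIM (what is proved, stated in full; the proofs are below) =====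
def Claim_equal_solution : Prop := ∀ (n : Int) (arr1 : List Int) (arr2 : List Int), Dom_solution n arr1 arr2 → Pre_solution n arr1 arr2 → Spec_solution n arr1 arr2 (solution n arr1 arr2)

-- ===== LEMMAS AND PROOFS =====

-- Every character Nat.toDigitsCore 2 emits is a binary digit (or came from the accumulator).
theorem pv_toDigitsCore_two_mem (f : Nat) : ∀ (x : Nat) (l : List Char) (c : Char),
    c ∈ Nat.toDigitsCore 2 f x l → c ∈ l ∨ c = '0' ∨ c = '1' := by
  induction f with
  | zero => intro x l c h; exact Or.inl h
  | succ f ih =>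
    intro x l c h
    have hd : (x % 2).digitChar = '0' ∨ (x % 2).digitChar = '1' := by
      have : x % 2 = 0 ∨ x % 2 = 1 := Nat.mod_two_eq_zero_or_one x
      rcases this with h2 | h2 <;> simp [h2, Nat.digitChar]
    simp only [Nat.toDigitsCore] at h
    split at h
    · rw [List.mem_cons] at h
      rcases h with h | h
      · exact Or.inr (h ▸ hd)
      · exact Or.inl h
    · rcases ih (x / 2) ((x % 2).digitChar :: l) c h with h' | h'
      · rw [List.mem_cons] at h'
        rcases h' with h' | h'
        · exact Or.inr (h' ▸ hd)
        · exact Or.inl h'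
      · exact Or.inr h'

theorem pv_toDigits_two_mem (x : Nat) (c : Char) (h : c ∈ Nat.toDigits 2 x) :
    c = '0' ∨ c = '1' := by
  rcases pv_toDigitsCore_two_mem (x + 1) x [] c h with h' | h'
  · exact absurd h' (List.not_mem_nil)
  · exact h'

-- toDigitsCore appends to its accumulator.
theorem pv_toDigitsCore_append (b : Nat) (f : Nat) : ∀ (x : Nat) (l : List Char),
    Nat.toDigitsCore b f x l = Nat.toDigitsCore b f x [] ++ l := by
  induction f with
  | zero => intro x l; simp [Nat.toDigitsCore]
  | succ f ih =>
    intro x l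
    simp only [Nat.toDigitsCore]
    split
    · simp
    · rw [ih (x / b) ((x % b).digitChar :: l), ih (x / b) [(x % b).digitChar]]
      simp

-- Fuel irrelevance for toDigitsCore at base 2.
theorem pv_toDigitsCore_fuel (x : Nat) : ∀ (f g : Nat) (l : List Char), x < f → x < g →
    Nat.toDigitsCore 2 f x l = Nat.toDigitsCore 2 g x l := by
  induction x using Nat.strong_induction_on with
  | _ x ih =>
    intro f g l hf hg
    match f, g with
    | f + 1, g + 1 =>
      simp only [Nat.toDigitsCore]
      split
      · rfl
      · have hx2 : x / 2 < x := Nat.div_lt_self (by omega) (by omega)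
        exact ih (x / 2) hx2 f g _ (by omega) (by omega)

-- The recursion bin(x) = bin(x/2) ++ last digit, for x ≥ 2.
theorem pv_toDigits_two_rec (x : Nat) (h : 2 ≤ x) :
    Nat.toDigits 2 x = Nat.toDigits 2 (x / 2) ++ [(x % 2).digitChar] := by
  unfold Nat.toDigits
  have h1 : Nat.toDigitsCore 2 (x + 1) x [] = Nat.toDigitsCore 2 x (x / 2) [(x % 2).digitChar] := by
    simp only [Nat.toDigitsCore]
    split
    · omega
    · rfl
  rw [h1, pv_toDigitsCore_append 2 x (x / 2),
      pv_toDigitsCore_fuel (x / 2) x (x / 2 + 1) [] (by omega) (by omega)]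

-- zfill on a sign-free nonempty string is a left pad with '0'.
theorem pv_zfill_eq (cs : List Char) (w : Int) (hne : cs ≠ [])
    (hhead : ∀ c ∈ cs.take 1, c ≠ '+' ∧ c ≠ '-') :
    PySem.Chars.zfill cs w = List.replicate (w.toNat - cs.length) '0' ++ cs := by
  match cs with
  | c :: rest =>
    have hc := hhead c (by simp)
    unfold PySem.Chars.zfill
    split
    · have h0 : w.toNat - (c :: rest).length = 0 := by omega
      simp only [List.length_cons] at h0
      simp [h0]
    · have : ¬ (c = '+' ∨ c = '-') := by tauto
      simp [this]

-- The width-m zero-filled binary string of a < 2^m, characterised bit by bit (MSB first).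
theorem pv_padbin (m : Nat) : ∀ (a : Nat), 0 < m → a < 2 ^ m →
    PySem.Chars.zfill (Nat.toDigits 2 a) (m : Int) =
      (List.range m).map (fun k => if a.testBit (m - 1 - k) then '1' else '0') := by
  induction m with
  | zero => intro a h0 _; omega
  | succ m ih =>
    intro a _ ha
    have hhead : ∀ c ∈ (Nat.toDigits 2 a).take 1, c ≠ '+' ∧ c ≠ '-' := by
      intro c hc
      have : c ∈ Nat.toDigits 2 a := List.mem_of_mem_take hc
      rcases pv_toDigits_two_mem a c this with h | h <;> simp [h]
    by_cases h2 : a < 2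
    · -- single digit, padded with m zeros
      have hdig : Nat.toDigits 2 a = [a.digitChar] := by
        unfold Nat.toDigits
        simp only [Nat.toDigitsCore]
        have : a / 2 = 0 := by omega
        simp [this, Nat.mod_eq_of_lt h2]
      rw [hdig, pv_zfill_eq _ _ (by simp) (hdig ▸ hhead)]
      rw [List.range_succ, List.map_append]
      have hmap : (List.range m).map (fun k => if a.testBit (m + 1 - 1 - k) then '1' else '0') =
          List.replicate m '0' := by
        rw [List.eq_replicate_iff]
        constructor
        · simp
        · intro c hc
          simp only [List.mem_map, List.mem_range] at hc
          obtain ⟨k, hk, hck⟩ := hc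
          have hbit : a.testBit (m + 1 - 1 - k) = false := by
            apply Nat.testBit_lt_two_pow
            calc a < 2 ^ 1 := h2
            _ ≤ 2 ^ (m + 1 - 1 - k) := Nat.pow_le_pow_right (by omega) (by omega)
          rw [← hck, hbit]; rfl
      rw [hmap]
      have hlast : a.digitChar = if a.testBit (m + 1 - 1 - m) then '1' else '0' := by
        interval_cases a <;> simp [Nat.digitChar]
      simp [hlast]
    · -- a ≥ 2: peel the last digit and use the IH on a / 2
      have hm : 0 < m := by
        by_contra hm0
        have : m = 0 := by omega
        subst this; omega
      rw [pv_toDigits_two_rec a (by omega)]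
      have hne : Nat.toDigits 2 (a / 2) ≠ [] := by
        intro hnil
        -- toDigits is never empty: its core with positive fuel conses at least one char
        have hlen : (Nat.toDigits 2 (a / 2)).length = 0 := by rw [hnil]; rfl
        unfold Nat.toDigits at hlen
        revert hlen
        simp only [Nat.toDigitsCore]
        split
        · simp
        · rw [pv_toDigitsCore_append]
          simp
      have hhead2 : ∀ c ∈ (Nat.toDigits 2 (a / 2)).take 1, c ≠ '+' ∧ c ≠ '-' := by
        intro c hc
        have : c ∈ Nat.toDigits 2 (a / 2) := List.mem_of_mem_take hc
        rcases pv_toDigits_two_mem (a / 2) c this with h | h <;> simp [h]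
      have hheadapp : ∀ c ∈ (Nat.toDigits 2 (a / 2) ++ [(a % 2).digitChar]).take 1, c ≠ '+' ∧ c ≠ '-' := by
        intro c hc
        have : c ∈ Nat.toDigits 2 (a / 2) ++ [(a % 2).digitChar] := List.mem_of_mem_take hc
        rcases List.mem_append.mp this with h | h
        · rcases pv_toDigits_two_mem (a / 2) c h with h' | h' <;> simp [h']
        · have : c = (a % 2).digitChar := by simpa using h
          subst this
          rcases Nat.mod_two_eq_zero_or_one a with h' | h' <;> simp [h', Nat.digitChar]
      rw [pv_zfill_eq _ _ (by simp) hheadapp]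
      have ihh := ih (a / 2) hm (Nat.div_lt_of_lt_mul (by rw [← pow_succ']; exact ha))
      rw [pv_zfill_eq _ _ hne hhead2] at ihh
      have hlen : (Nat.toDigits 2 (a / 2) ++ [(a % 2).digitChar]).length
          = (Nat.toDigits 2 (a / 2)).length + 1 := by simp
      have hrep : ((((m + 1 : Nat)) : Int).toNat - (Nat.toDigits 2 (a / 2) ++ [(a % 2).digitChar]).length)
          = ((m : Int).toNat - (Nat.toDigits 2 (a / 2)).length) := by
        simp only [hlen]
        omega
      rw [hrep, ← List.append_assoc, ihh]
      rw [List.range_succ, List.map_append]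
      congr 1
      · apply List.map_congr_left
        intro k hk
        have hk' : k < m := List.mem_range.mp hk
        have : m + 1 - 1 - k = (m - 1 - k) + 1 := by omega
        rw [this, ← Nat.testBit_div_two]
      · have : m + 1 - 1 - m = 0 := by omega
        simp only [List.map_cons, List.map_nil, this, Nat.testBit_zero]
        rcases Nat.mod_two_eq_zero_or_one a with h' | h' <;> simp [h', Nat.digitChar]

-- if-push for the inner loop body of A.
theorem pv_if_append (s : List Char) (c : Prop) [Decidable c] :
    (if c then s ++ [' '] else s ++ ['#']) = s ++ [if c then ' ' else '#'] := by
  split <;> rfl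

-- one row of A equals one row of B, for 0 ≤ a, b < 2^m bits wide m > 0
theorem pv_row (m : Nat) (hm : 0 < m) (a b : Int) (ha0 : 0 ≤ a) (ha : a < 2 ^ m)
    (hb0 : 0 ≤ b) (hb : b < 2 ^ m) :
    ((PySem.List.pyRange 0 (m : Int) 1).foldl (fun add_str j =>
        if PySem.List.pyGetD
              ((PySem.Chars.zfill (PySem.List.slice (PySem.Int.toBinChars0b a) (some 2) none) (m : Int)).map pvCharInt) j 0
            + PySem.List.pyGetD
              ((PySem.Chars.zfill (PySem.List.slice (PySem.Int.toBinChars0b b) (some 2) none) (m : Int)).map pvCharInt) j 0 = 0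
        then add_str ++ [' '] else add_str ++ ['#']) []) =
    (PySem.Chars.zfill (PySem.Int.toBinChars (PySem.Int.bor a b)) (m : Int)).map
      (fun c => if c = '1' then '#' else ' ') := by
  -- normalise the padded binary strings to their bit characterisation
  have hslice : ∀ x : Int, 0 ≤ x →
      PySem.List.slice (PySem.Int.toBinChars0b x) (some 2) none = Nat.toDigits 2 x.toNat := by
    intro x hx
    rw [PySem.List.slice_from _ (by omega : (0:Int) ≤ 2)]
    unfold PySem.Int.toBinChars0b
    rw [if_neg (by omega)]
    rfl
  have hna : a.toNat < 2 ^ m := by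
    have h1 : (a.toNat : Int) < ((2 ^ m : Nat) : Int) := by
      rw [Int.toNat_of_nonneg ha0]; exact_mod_cast ha
    exact_mod_cast h1
  have hnb : b.toNat < 2 ^ m := by
    have h1 : (b.toNat : Int) < ((2 ^ m : Nat) : Int) := by
      rw [Int.toNat_of_nonneg hb0]; exact_mod_cast hb
    exact_mod_cast h1
  have hpada := pv_padbin m a.toNat hm hna
  have hpadb := pv_padbin m b.toNat hm hnb
  -- B's string
  have hbor : PySem.Int.bor a b = ((a.toNat ||| b.toNat : Nat) : Int) := PySem.Int.bor_of_nonneg ha0 hb0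
  have hnor : (a.toNat ||| b.toNat) < 2 ^ m := by
    have h1 : ∀ i : Nat, m ≤ i → (a.toNat ||| b.toNat).testBit i = false := by
      intro i hi
      rw [Nat.testBit_lor,
          Nat.testBit_lt_two_pow (lt_of_lt_of_le hna (Nat.pow_le_pow_right (by omega) hi)),
          Nat.testBit_lt_two_pow (lt_of_lt_of_le hnb (Nat.pow_le_pow_right (by omega) hi))]
      rfl
    exact Nat.lt_pow_two_of_testBit _ h1
  have hbinor : PySem.Int.toBinChars (PySem.Int.bor a b) = Nat.toDigits 2 (a.toNat ||| b.toNat) := by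
    rw [hbor]
    unfold PySem.Int.toBinChars
    rw [if_neg (by omega)]
    simp
  rw [hbinor, pv_padbin m (a.toNat ||| b.toNat) hm hnor]
  rw [hslice a ha0, hslice b hb0, hpada, hpadb]
  -- A's inner loop as a map over range m
  have hloop : ∀ (f : Int → Char),
      (PySem.List.pyRange 0 (m : Int) 1).foldl (fun s j => s ++ [f j]) ([] : List Char)
        = (PySem.List.pyRange 0 (m : Int) 1).map f := by
    intro f
    rw [PySem.List.foldl_append_singleton_eq_map]
    simp
  have hbody : (fun (add_str : List Char) (j : Int) =>
      if PySem.List.pyGetD (((List.range m).map (fun k => if a.toNat.testBit (m - 1 - k) then '1' else '0')).map pvCharInt) j 0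
          + PySem.List.pyGetD (((List.range m).map (fun k => if b.toNat.testBit (m - 1 - k) then '1' else '0')).map pvCharInt) j 0 = 0
      then add_str ++ [' '] else add_str ++ ['#'])
      = (fun (add_str : List Char) (j : Int) => add_str ++
        [if PySem.List.pyGetD (((List.range m).map (fun k => if a.toNat.testBit (m - 1 - k) then '1' else '0')).map pvCharInt) j 0
            + PySem.List.pyGetD (((List.range m).map (fun k => if b.toNat.testBit (m - 1 - k) then '1' else '0')).map pvCharInt) j 0 = 0
         then ' ' else '#']) := by
    funext s j
    exact pv_if_append s _
  rw [hbody, hloop]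
  simp only [PySem.List.pyRange_zero_nat, List.map_map]
  apply List.map_congr_left
  intro k hk
  have hk' : k < m := List.mem_range.mp hk
  simp only [Function.comp_apply, PySem.List.pyGetD_natCast]
  rw [PySem.List.getD_map_range _ m k _ hk', PySem.List.getD_map_range _ m k _ hk']
  cases hba : a.toNat.testBit (m - 1 - k) <;> cases hbb : b.toNat.testBit (m - 1 - k) <;>
    simp only [Function.comp_apply, Nat.testBit_lor, hba, hbb, Bool.or_self, Bool.or_true,
      Bool.true_or, if_true] <;> decide

-- ===== VERDICT (by name: the statement is the Claim_ definition above) =====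
theorem solution_spec : Claim_equal_solution := by
  intro n arr1 arr2 _ hpre
  obtain ⟨hlen1, hlen2, hrows⟩ := hpre
  show solution n arr1 arr2 = solution_alt n arr1 arr2
  unfold solution solution_alt
  rw [PySem.List.foldl_append_singleton_eq_map, PySem.List.foldl_append_singleton_eq_map]
  simp only [List.nil_append]
  apply List.map_congr_left
  intro i hi
  obtain ⟨hi0, hin⟩ := PySem.List.mem_pyRange_one.mp hi
  have hn0 : 0 < n := lt_of_le_of_lt hi0 hin
  have hnm : n = ((n.toNat : Nat) : Int) := (Int.toNat_of_nonneg (by omega)).symm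
  set m := n.toNat with hm
  have hkm : i.toNat < m := by omega
  have hrow := hrows i.toNat (by omega)
  have hgd1 : arr1.getD i.toNat 0 = arr1[i.toNat]'(by omega) := List.getD_eq_getElem arr1 0 (by omega)
  have hgd2 : arr2.getD i.toNat 0 = arr2[i.toNat]'(by omega) := List.getD_eq_getElem arr2 0 (by omega)
  set a : Int := arr1[i.toNat]'(by omega) with hadef
  set b : Int := arr2[i.toNat]'(by omega) with hbdef
  have hget1 : PySem.List.pyGetD
      (arr1.map (fun row => PySem.Chars.zfill (PySem.List.slice (PySem.Int.toBinChars0b row) (some 2) none) n)) i []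
      = PySem.Chars.zfill (PySem.List.slice (PySem.Int.toBinChars0b a) (some 2) none) n := by
    rw [PySem.List.pyGetD_eq_getElem _ _ hi0 (by simp; omega), List.getElem_map]
  have hget2 : PySem.List.pyGetD
      (arr2.map (fun row => PySem.Chars.zfill (PySem.List.slice (PySem.Int.toBinChars0b row) (some 2) none) n)) i []
      = PySem.Chars.zfill (PySem.List.slice (PySem.Int.toBinChars0b b) (some 2) none) n := by
    rw [PySem.List.pyGetD_eq_getElem _ _ hi0 (by simp; omega), List.getElem_map]
  have hgeta : PySem.List.pyGetD arr1 i 0 = a := by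
    rw [PySem.List.pyGetD_eq_getElem _ _ hi0 (by omega)]
  have hgetb : PySem.List.pyGetD arr2 i 0 = b := by
    rw [PySem.List.pyGetD_eq_getElem _ _ hi0 (by omega)]
  simp only [hget1, hget2, hgeta, hgetb]
  congr 1
  have h2pow : ((2 : Int) ^ m) = ((2 ^ m : Nat) : Int) := by push_cast; ring
  rw [hnm]
  exact pv_row m (by omega) a b
    (by rw [← hgd1]; exact hrow.1)
    (by rw [← hgd1]; exact_mod_cast hrow.2.1)
    (by rw [← hgd2]; exact hrow.2.2.1)
    (by rw [← hgd2]; exact_mod_cast hrow.2.2.2)
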